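-- pv_equiv track=rewrite | github.com/aayush8991/Database-Track-2 | core/crud_engine.py | _project_fields
-- ===== SOURCE A (Python) =====
-- def _project_fields(record: dict, fields: list) -> dict:
--     """Project only requested fields from a record."""
--     if not fields:
--         return record
--
--     projected = {}
--     for field in fields:
--         if field in record:
--             projected[field] = record[field]
--
--     return projected
-- ===== SOURCE B (Python) =====
-- def _project_fields(record: dict, fields: list) -> dict:
--     """Project only requested fields from a record."""
--     if not fields:
--         return record
--     # Index each requested field by its first position, then traverse the
--     # record's keys and sort the present ones by that position.
--     first = {}
--     for i, f in enumerate(fields):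
--         if f not in first:
--             first[f] = i
--     keys = sorted((k for k in record if k in first), key=lambda k: first[k])
--     return {k: record[k] for k in keys}
-- ===== Notes on version B (the rewrite author's own statement) =====
-- stated objective: alternative
-- what changed: Instead of scanning the fields list and copying present keys in encounter order, B builds a first-occurrence position index of the fields, traverses the record's keys collecting those in the index, and sorts them by that position before building the projection.
import Mathlib
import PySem

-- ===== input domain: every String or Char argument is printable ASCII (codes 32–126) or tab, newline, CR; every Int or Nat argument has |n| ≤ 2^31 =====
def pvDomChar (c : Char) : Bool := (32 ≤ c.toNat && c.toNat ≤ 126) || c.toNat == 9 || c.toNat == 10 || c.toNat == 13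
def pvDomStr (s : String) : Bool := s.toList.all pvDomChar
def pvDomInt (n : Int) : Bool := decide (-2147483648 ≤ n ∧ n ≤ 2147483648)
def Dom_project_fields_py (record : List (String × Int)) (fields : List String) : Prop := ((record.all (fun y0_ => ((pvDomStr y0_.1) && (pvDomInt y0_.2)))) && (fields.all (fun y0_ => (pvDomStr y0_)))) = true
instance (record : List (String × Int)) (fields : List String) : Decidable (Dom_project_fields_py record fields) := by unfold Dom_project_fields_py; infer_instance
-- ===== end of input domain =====

-- B indexes the fields by first position once, traverses the RECORD's keys and sorts the
-- requested ones by that position (objective: alternative — record-driven traversal + sort,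
-- same result including insertion order).
-- The record dict is an association list; both ports read it through PySem.Dict.ofList.

-- ===== PORT A =====
def project_fields_py (record : List (String × Int)) (fields : List String) : List (String × Int) :=
  let d := PySem.Dict.ofList record
  if fields = [] then d.items
  else
    -- 'if field in record: projected[field] = record[field]' — contains ↔ get? = some
    (fields.foldl (fun projected field =>
        match d.get? field with
        | some v => projected.insert field v
        | none => projected) PySem.Dict.empty).items

-- ===== PORT B =====
def project_fields_py_alt (record : List (String × Int)) (fields : List String) : List (String × Int) :=
  let d := PySem.Dict.ofList record
  if fields = [] then d.items
  else
    -- first = {}; for i, f in enumerate(fields): if f not in first: first[f] = i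
    let first : PySem.Dict String Int :=
      (PySem.List.enumerate fields).foldl
        (fun fst p => if fst.contains p.2 then fst else fst.insert p.2 p.1) PySem.Dict.empty
    -- keys = sorted((k for k in record if k in first), key=lambda k: first[k])
    let keys := PySem.List.sorted (d.keys.filter (fun k => first.contains k))
        (fun k => first.getD k 0) false
    -- {k: record[k] for k in keys}; record[k] never raises (k comes from record)
    (PySem.Dict.ofList (keys.filterMap (fun k => (d.get? k).map (fun v => (k, v))))).items

-- ===== PRECONDITION & SPEC =====
def Spec_project_fields_py (record : List (String × Int)) (fields : List String) (out : List (String × Int)) : Prop := out = project_fields_py_alt record fields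
instance (record : List (String × Int)) (fields : List String) (out : List (String × Int)) : Decidable (Spec_project_fields_py record fields out) := by unfold Spec_project_fields_py; infer_instance

-- ===== CLAIM (what is proved, stated in full; the proofs are below) =====
def Claim_equal_project_fields_py : Prop := ∀ (record : List (String × Int)) (fields : List String), Dom_project_fields_py record fields → Spec_project_fields_py record fields (project_fields_py record fields)

-- ===== LEMMAS AND PROOFS =====

-- the (field, value) pairs a lookup-filter pass over a field list produces, in order
def pvPairs (d : PySem.Dict String Int) (fields : List String) : List (String × Int) :=
  fields.filterMap (fun f => (d.get? f).map (fun v => (f, v)))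

-- B's first-occurrence index loop body
def pvStep (fst : PySem.Dict String Int) (p : Int × String) : PySem.Dict String Int :=
  if fst.contains p.2 then fst else fst.insert p.2 p.1

-- Dict.ofList is the fold of inserts (definitional)
theorem pvOfList_eq_foldl (l : List (String × Int)) :
    PySem.Dict.ofList l
      = l.foldl (fun d p => PySem.Dict.insert d p.1 p.2) PySem.Dict.empty :=
  PySem.Dict.ext_iff.mpr rfl

-- dedup (= dict.fromkeys) unfolds on a cons to head + filtered tail
theorem pvDedup_cons (x : String) (l : List String) :
    PySem.List.dedup (x :: l)
      = x :: (PySem.List.dedup l).filter (fun y => !(y == x)) := by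
  simp [pysem, PySem.Set.discard]

-- every produced pair is a successful lookup
theorem pvPairs_mem (d : PySem.Dict String Int) (l : List String)
    (p : String × Int) (hp : p ∈ pvPairs d l) : d.get? p.1 = some p.2 := by
  unfold pvPairs at hp
  rcases List.mem_filterMap.mp hp with ⟨f, _, hf⟩
  cases h : d.get? f with
  | none => rw [h] at hf; simp at hf
  | some v =>
    rw [h] at hf
    simp only [Option.map_some, Option.some.injEq] at hf
    subst hf
    exact h

-- filtering the fields commutes with producing the pairs
theorem pvPairs_filter (d : PySem.Dict String Int) (f : String) (xs : List String) :
    pvPairs d (xs.filter (fun y => !(y == f)))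
      = (pvPairs d xs).filter (fun p => !(p.1 == f)) := by
  induction xs with
  | nil => rfl
  | cons x xs ih =>
    by_cases hx : x = f
    · subst hx
      simp only [pvPairs, List.filter_cons, List.filterMap_cons] at *
      cases h : d.get? x <;> simp [ih]
    · simp only [pvPairs, List.filter_cons, List.filterMap_cons] at *
      cases h : d.get? x <;> simp [h, hx, ih]

-- dropping the fields a dict does not hold does not change the pairs
theorem pvPairs_filter_contains (d : PySem.Dict String Int) (l : List String) :
    pvPairs d (l.filter (fun k => d.contains k)) = pvPairs d l := by
  induction l with
  | nil => rfl
  | cons x xs ih =>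
    simp only [pvPairs, List.filter_cons] at *
    rw [PySem.Dict.contains_eq_isSome_get?]
    cases h : d.get? x <;> simp [h, ih]

-- re-inserting a binding the dict already holds changes nothing
theorem pvInsert_self (e : PySem.Dict String Int) (k : String) (v : Int)
    (hnd : e.keys.Nodup) (h : e.get? k = some v) : e.insert k v = e := by
  have hc : e.contains k = true := by
    rw [PySem.Dict.contains_eq_isSome_get?, h]; rfl
  apply PySem.Dict.ext
  rw [PySem.Dict.items_insert_of_contains _ _ hc]
  rw [List.map_congr_left (g := id) ?_, List.map_id]
  intro q hq
  by_cases hqk : q.1 = k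
  · have h2 : e.get? q.1 = some q.2 :=
      PySem.Dict.get?_of_mem_items e (by simpa using hq) hnd
    rw [hqk, h] at h2
    have hv : v = q.2 := by injection h2
    simp only [id, hqk, beq_self_eq_true, if_true]
    exact Prod.ext_iff.mpr ⟨hqk.symm, hv⟩
  · simp [hqk]

-- pairs whose key the accumulator already binds (consistently with d) can be skipped
theorem pvFoldl_skip (d : PySem.Dict String Int) (l : List (String × Int)) :
    ∀ (e : PySem.Dict String Int) (f : String) (v : Int), e.keys.Nodup →
      e.get? f = some v → (∀ p ∈ l, d.get? p.1 = some p.2) → d.get? f = some v →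
      l.foldl (fun d p => PySem.Dict.insert d p.1 p.2) e
        = (l.filter (fun p => !(p.1 == f))).foldl
            (fun d p => PySem.Dict.insert d p.1 p.2) e := by
  induction l with
  | nil => intro e f v _ _ _ _; rfl
  | cons p l ih =>
    intro e f v hnd hef hl hdf
    obtain ⟨p1, p2⟩ := p
    by_cases hpf : p1 = f
    · subst hpf
      have hpv : p2 = v := by
        have h0 := hl (p1, p2) List.mem_cons_self
        rw [hdf] at h0
        injection h0 with h1
        exact h1.symm
      subst hpv
      simp only [List.filter_cons, beq_self_eq_true, Bool.not_true, List.foldl_cons]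
      rw [pvInsert_self e p1 p2 hnd hef]
      exact ih e p1 p2 hnd hef (fun q hq => hl q (List.mem_cons_of_mem _ hq)) hdf
    · have hb : (!(p1 == f)) = true := by simp [hpf]
      simp only [List.filter_cons, hb, if_true, List.foldl_cons]
      exact ih (e.insert p1 p2) f v (PySem.Dict.nodup_keys_insert _ _ _ hnd)
        (by rw [PySem.Dict.get?_insert_of_ne _ _ (fun h => hpf h.symm)]; exact hef)
        (fun q hq => hl q (List.mem_cons_of_mem _ hq)) hdf

-- folding the pairs of the raw field list equals folding the pairs of its dedup
theorem pvFoldl_pairs_dedup (d : PySem.Dict String Int) (fields : List String) :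
    ∀ (e : PySem.Dict String Int), e.keys.Nodup →
      (∀ k v, e.get? k = some v → d.get? k = some v) →
      (pvPairs d fields).foldl (fun d p => PySem.Dict.insert d p.1 p.2) e
        = (pvPairs d (PySem.List.dedup fields)).foldl
            (fun d p => PySem.Dict.insert d p.1 p.2) e := by
  induction fields with
  | nil => intro e _ _; rfl
  | cons f fs ih =>
    intro e hnd hinv
    rw [pvDedup_cons]
    simp only [pvPairs, List.filterMap_cons] at *
    cases h : d.get? f with
    | none =>
      simp only [Option.map_none]
      rw [show ((PySem.List.dedup fs).filter (fun y => !(y == f))).filterMap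
            (fun f => (d.get? f).map (fun v => (f, v)))
          = pvPairs d ((PySem.List.dedup fs).filter (fun y => !(y == f))) from rfl,
        pvPairs_filter]
      rw [List.filter_eq_self.mpr ?_]
      · exact ih e hnd hinv
      · intro p hp
        have := pvPairs_mem d (PySem.List.dedup fs) p hp
        simp only [Bool.not_eq_eq_eq_not, Bool.not_true, beq_eq_false_iff_ne, ne_eq]
        intro hpf
        rw [hpf, h] at this
        simp at this
    | some v =>
      simp only [Option.map_some, List.foldl_cons]
      have hinv' : ∀ k w, (e.insert f v).get? k = some w → d.get? k = some w := by
        intro k w hk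
        rw [PySem.Dict.get?_insert] at hk
        by_cases hkf : k = f
        · rw [if_pos hkf] at hk
          rw [hkf, h, hk]
        · rw [if_neg hkf] at hk
          exact hinv k w hk
      rw [ih (e.insert f v) (PySem.Dict.nodup_keys_insert _ _ _ hnd) hinv']
      rw [show ((PySem.List.dedup fs).filter (fun y => !(y == f))).filterMap
            (fun f => (d.get? f).map (fun v => (f, v)))
          = pvPairs d ((PySem.List.dedup fs).filter (fun y => !(y == f))) from rfl,
        pvPairs_filter]
      exact pvFoldl_skip d (pvPairs d (PySem.List.dedup fs)) (e.insert f v) f v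
        (PySem.Dict.nodup_keys_insert _ _ _ hnd)
        (PySem.Dict.get?_insert_self _ _ _)
        (fun p hp => pvPairs_mem d _ p hp) h

-- A's loop inserts exactly the pvPairs, in order
theorem pvA_loop_eq (d : PySem.Dict String Int) (fields : List String) :
    ∀ (acc : PySem.Dict String Int),
      fields.foldl (fun projected field =>
          match d.get? field with
          | some v => projected.insert field v
          | none => projected) acc
        = (pvPairs d fields).foldl (fun d p => PySem.Dict.insert d p.1 p.2) acc := by
  induction fields with
  | nil => intro acc; rfl
  | cons f fs ih =>
    intro acc
    simp only [List.foldl_cons, pvPairs, List.filterMap_cons]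
    cases h : d.get? f with
    | none => simpa [pvPairs] using ih _
    | some v => simpa [pvPairs] using ih _

-- membership in B's first-occurrence index = membership in the fields
theorem pvFirst_contains (l : List (Int × String)) :
    ∀ (d0 : PySem.Dict String Int) (k : String),
      (l.foldl pvStep d0).contains k = (d0.contains k || l.any (fun p => p.2 == k)) := by
  induction l with
  | nil => intro d0 k; simp
  | cons p l ih =>
    intro d0 k
    simp only [List.foldl_cons, List.any_cons, pvStep]
    by_cases hc : d0.contains p.2 = true
    · rw [if_pos hc, ih]
      by_cases hpk : p.2 = k
      · subst hpk; rw [hc]; simp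
      · have h2 : (p.2 == k) = false := by simp [hpk]
        rw [h2]; simp
    · rw [if_neg hc, ih, PySem.Dict.contains_insert]
      by_cases hpk : k = p.2
      · subst hpk; simp
      · have h1 : (k == p.2) = false := by simp [hpk]
        have h2 : (p.2 == k) = false := by simp [Ne.symm hpk]
        rw [h1, h2]; simp

-- a key the index already holds keeps its value through the loop
theorem pvFirst_stable (l : List (Int × String)) :
    ∀ (d0 : PySem.Dict String Int) (k : String), d0.contains k = true →
      (l.foldl pvStep d0).getD k 0 = d0.getD k 0 := by
  induction l with
  | nil => intro d0 k _; rfl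
  | cons p l ih =>
    intro d0 k hk
    simp only [List.foldl_cons, pvStep]
    by_cases hc : d0.contains p.2
    · rw [if_pos hc, ih _ _ hk]
    · rw [if_neg hc]
      have hpk : k ≠ p.2 := fun h => hc (h ▸ hk)
      rw [ih _ _ (by rw [PySem.Dict.contains_insert]; simp [hk])]
      exact PySem.Dict.getD_insert_of_ne d0 p.1 0 hpk

-- the index maps a new field to its first index, offset by the enumeration start
theorem pvFirst_getD (fields : List String) :
    ∀ (s : Int) (d0 : PySem.Dict String Int) (k : String), k ∈ fields →
      d0.contains k = false →
      ((PySem.List.enumerate fields s).foldl pvStep d0).getD k 0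
        = s + (fields.idxOf k : Int) := by
  induction fields with
  | nil => intro _ _ _ hk _; simp at hk
  | cons f fs ih =>
    intro s d0 k hk h0
    rw [PySem.List.enumerate_cons]
    simp only [List.foldl_cons, pvStep]
    by_cases hkf : k = f
    · subst hkf
      rw [if_neg (by simp [h0])]
      rw [pvFirst_stable _ _ _ (PySem.Dict.contains_insert_self _ _ _),
        PySem.Dict.getD_insert_self]
      simp [List.idxOf_cons_self]
    · have hkfs : k ∈ fs := by
        rcases List.mem_cons.mp hk with h | h
        · exact absurd h hkf
        · exact h
      have hidx : ((f :: fs).idxOf k : Int) = (fs.idxOf k : Int) + 1 := by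
        rw [List.idxOf_cons_ne _ (fun h => hkf (h.symm))]
        push_cast [Nat.succ_eq_add_one]; ring
      by_cases hc : d0.contains f = true
      · rw [if_pos hc, ih (s + 1) d0 k hkfs h0, hidx]; ring
      · rw [if_neg hc, ih (s + 1) _ k hkfs
          (by rw [PySem.Dict.contains_insert]; simp [hkf, h0]), hidx]
        ring

-- the deduped field list is ordered by first-occurrence index
theorem pvDedup_idxOf_pairwise (fields : List String) :
    (PySem.List.dedup fields).Pairwise
      (fun a b => fields.idxOf a < fields.idxOf b) := by
  induction fields with
  | nil => simp [PySem.List.dedup]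
  | cons f fs ih =>
    rw [pvDedup_cons]
    refine List.Pairwise.cons ?_ ?_
    · intro b hb
      have hbf : b ≠ f := by
        have := (List.mem_filter.mp hb).2
        simpa using this
      rw [List.idxOf_cons_self, List.idxOf_cons_ne _ (fun h => hbf h.symm)]
      exact Nat.succ_pos _
    · refine List.Pairwise.imp_of_mem ?_ (List.Pairwise.filter _ ih)
      intro a b ha hb hab
      have haf : a ≠ f := by simpa using (List.mem_filter.mp ha).2
      have hbf : b ≠ f := by simpa using (List.mem_filter.mp hb).2
      rw [List.idxOf_cons_ne _ (fun h => haf h.symm),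
        List.idxOf_cons_ne _ (fun h => hbf h.symm)]
      omega

-- ===== VERDICT (by name: the statement is the Claim_ definition above) =====
theorem project_fields_py_spec : Claim_equal_project_fields_py := by
  intro record fields _
  unfold Spec_project_fields_py project_fields_py project_fields_py_alt
  by_cases h : fields = []
  · simp [h]
  · simp only [h, if_false]
    set d := PySem.Dict.ofList record with hd
    set first := (PySem.List.enumerate fields).foldl
        (fun fst p => if fst.contains p.2 then fst else fst.insert p.2 p.1)
        PySem.Dict.empty with hfirst
    have hfirst' : first = (PySem.List.enumerate fields).foldl pvStep PySem.Dict.empty := rfl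
    -- 1. the key list B sorts equals the contained prefix-free field list
    have hKA : PySem.List.sorted (d.keys.filter (fun k => first.contains k))
        (fun k => first.getD k 0) false
        = (PySem.List.dedup fields).filter (fun k => d.contains k) := by
      apply PySem.List.sorted_eq_of_perm_of_pairwise_lt
      · -- permutation: both Nodup with the same members
        have hnd1 : ((PySem.List.dedup fields).filter (fun k => d.contains k)).Nodup :=
          (PySem.Set.nodup_ofList fields).filter _
        have hnd2 : (d.keys.filter (fun k => first.contains k)).Nodup :=
          (PySem.Dict.nodup_keys_ofList record).filter _
        rw [List.perm_ext_iff_of_nodup hnd1 hnd2]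
        intro k
        simp only [List.mem_filter]
        have hmemf : k ∈ PySem.List.dedup fields ↔ k ∈ fields := PySem.Set.mem_ofList fields k
        have hcontains : first.contains k = true ↔ k ∈ fields := by
          rw [hfirst', pvFirst_contains]
          simp only [PySem.Dict.contains_empty, Bool.false_or, List.any_eq_true]
          constructor
          · rintro ⟨p, hp, hpk⟩
            rcases (PySem.List.mem_enumerate_iff fields 0 p).mp hp with ⟨j, hj, rfl⟩
            have hjk : fields[j] = k := by simpa using hpk
            exact hjk ▸ List.getElem_mem hj
          · intro hk
            rcases List.mem_iff_getElem.mp hk with ⟨j, hj, hjk⟩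
            exact ⟨(0 + j, fields[j]),
              (PySem.List.mem_enumerate_iff fields 0 _).mpr ⟨j, hj, rfl⟩,
              by simp [hjk]⟩
        have hck : d.contains k = true ↔ k ∈ d.keys := PySem.Dict.contains_iff_mem_keys d k
        constructor
        · rintro ⟨h1, h2⟩
          exact ⟨hck.mp h2, hcontains.mpr (hmemf.mp h1)⟩
        · rintro ⟨h1, h2⟩
          exact ⟨hmemf.mpr (hcontains.mp h2), hck.mpr h1⟩
      · -- strictly increasing first-occurrence indices
        refine List.Pairwise.imp_of_mem ?_
          (List.Pairwise.filter _ (pvDedup_idxOf_pairwise fields))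
        intro a b ha hb hab
        have hma : a ∈ fields := (PySem.Set.mem_ofList fields a).mp (List.mem_of_mem_filter ha)
        have hmb : b ∈ fields := (PySem.Set.mem_ofList fields b).mp (List.mem_of_mem_filter hb)
        rw [hfirst', pvFirst_getD fields 0 PySem.Dict.empty a hma (PySem.Dict.contains_empty _),
          pvFirst_getD fields 0 PySem.Dict.empty b hmb (PySem.Dict.contains_empty _)]
        simpa using hab
    rw [hKA]
    -- 2. both sides fold inserts of the same pair list from empty
    rw [show ((PySem.List.dedup fields).filter (fun k => d.contains k)).filterMap
          (fun k => (d.get? k).map (fun v => (k, v)))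
        = pvPairs d ((PySem.List.dedup fields).filter (fun k => d.contains k)) from rfl,
      pvPairs_filter_contains, pvA_loop_eq, pvOfList_eq_foldl]
    exact congrArg PySem.Dict.items
      (pvFoldl_pairs_dedup d fields PySem.Dict.empty
        PySem.Dict.nodup_keys_empty
        (fun k v hk => by rw [PySem.Dict.get?_empty] at hk; simp at hk))
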